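-- pv_equiv track=rewrite | github.com/dlesser71n/cyber-pi | src/collectors/vendor_threat_intelligence_collector.py | _identify_compliance_issues
-- ===== SOURCE A (Python) =====
-- from typing import Dict, List, Any, Optional, Tuple
--
-- def _identify_compliance_issues(vendor_name: str, vulnerabilities: List[Dict]) -> List[str]:
--     """Identify potential compliance issues"""
--     issues = []
--
--     critical_vulns = len([v for v in vulnerabilities if v.get('severity') == 'critical'])
--     if critical_vulns > 0:
--         issues.append("Critical vulnerabilities may impact compliance")
--
--     if any("authentication" in v.get('content', '').lower() for v in vulnerabilities):
--         issues.append("Authentication vulnerabilities may affect access control compliance")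
--
--     if any("data" in v.get('content', '').lower() for v in vulnerabilities):
--         issues.append("Data protection compliance concerns")
--
--     return issues
-- ===== SOURCE B (Python) =====
-- def _identify_compliance_issues(vendor_name, vulnerabilities):
--     """Single pass over vulnerabilities maintaining three flags, then emit the issue strings."""
--     has_critical = has_auth = has_data = False
--     for v in vulnerabilities:
--         if v.get('severity') == 'critical':
--             has_critical = True
--         content = v.get('content', '').lower()
--         if 'authentication' in content:
--             has_auth = True
--         if 'data' in content:
--             has_data = True
--     issues = []
--     if has_critical:
--         issues.append("Critical vulnerabilities may impact compliance")
--     if has_auth: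
--         issues.append("Authentication vulnerabilities may affect access control compliance")
--     if has_data:
--         issues.append("Data protection compliance concerns")
--     return issues
-- ===== Notes on version B (the rewrite author's own statement) =====
-- stated objective: simpler
-- what changed: Replaces the three separate scans (a filter-count plus two any() generator passes) with one loop over the vulnerabilities that maintains three booleans, lowering each content string once per item, then appends the fixed strings in the original order.
import Mathlib
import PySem

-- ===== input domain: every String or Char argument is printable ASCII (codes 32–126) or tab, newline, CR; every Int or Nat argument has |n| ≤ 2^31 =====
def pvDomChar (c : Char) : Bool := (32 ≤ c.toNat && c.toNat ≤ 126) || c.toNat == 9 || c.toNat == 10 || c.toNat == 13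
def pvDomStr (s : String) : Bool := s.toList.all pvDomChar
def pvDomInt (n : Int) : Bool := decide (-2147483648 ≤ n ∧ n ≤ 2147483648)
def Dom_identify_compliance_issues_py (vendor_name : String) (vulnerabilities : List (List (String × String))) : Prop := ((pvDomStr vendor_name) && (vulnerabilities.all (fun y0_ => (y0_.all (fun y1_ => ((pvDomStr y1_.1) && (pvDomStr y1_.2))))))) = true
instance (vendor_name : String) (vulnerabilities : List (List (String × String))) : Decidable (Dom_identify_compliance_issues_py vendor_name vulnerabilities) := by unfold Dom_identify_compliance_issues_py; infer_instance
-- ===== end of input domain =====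

-- Header: B replaces A's three separate scans with one single pass keeping three booleans; objective: simpler.
-- ===== PORT A =====
def identify_compliance_issues_py (vendor_name : String) (vulnerabilities : List (List (String × String))) : List String :=
  let issues : List String := []
  let critical_vulns : Nat :=
    (vulnerabilities.filter (fun v => (PySem.Dict.mk v).get? "severity" == some "critical")).length
  let issues := if critical_vulns > 0 then issues ++ ["Critical vulnerabilities may impact compliance"] else issues
  let issues :=
    if vulnerabilities.any (fun v => PySem.Str.isIn "authentication" (PySem.Str.lower ((PySem.Dict.mk v).getD "content" "")))
    then issues ++ ["Authentication vulnerabilities may affect access control compliance"] else issues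
  let issues :=
    if vulnerabilities.any (fun v => PySem.Str.isIn "data" (PySem.Str.lower ((PySem.Dict.mk v).getD "content" "")))
    then issues ++ ["Data protection compliance concerns"] else issues
  issues

-- ===== PORT B =====
def identify_compliance_issues_py_alt (vendor_name : String) (vulnerabilities : List (List (String × String))) : List String :=
  let flags :=
    vulnerabilities.foldl
      (fun (st : Bool × Bool × Bool) v =>
        let hc := st.1 || ((PySem.Dict.mk v).get? "severity" == some "critical")
        let content := PySem.Str.lower ((PySem.Dict.mk v).getD "content" "")
        let ha := st.2.1 || PySem.Str.isIn "authentication" content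
        let hd := st.2.2 || PySem.Str.isIn "data" content
        (hc, ha, hd))
      (false, false, false)
  let issues : List String := []
  let issues := if flags.1 then issues ++ ["Critical vulnerabilities may impact compliance"] else issues
  let issues := if flags.2.1 then issues ++ ["Authentication vulnerabilities may affect access control compliance"] else issues
  let issues := if flags.2.2 then issues ++ ["Data protection compliance concerns"] else issues
  issues

-- ===== PRECONDITION & SPEC =====
def Spec_identify_compliance_issues_py (vendor_name : String) (vulnerabilities : List (List (String × String))) (out : List String) : Prop := out = identify_compliance_issues_py_alt vendor_name vulnerabilities
instance (vendor_name : String) (vulnerabilities : List (List (String × String))) (out : List String) : Decidable (Spec_identify_compliance_issues_py vendor_name vulnerabilities out) := by unfold Spec_identify_compliance_issues_py; infer_instance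

-- ===== CLAIM (what is proved, stated in full; the proofs are below) =====
def Claim_equal_identify_compliance_issues_py : Prop := ∀ (vendor_name : String) (vulnerabilities : List (List (String × String))), Dom_identify_compliance_issues_py vendor_name vulnerabilities → Spec_identify_compliance_issues_py vendor_name vulnerabilities (identify_compliance_issues_py vendor_name vulnerabilities)

-- ===== LEMMAS AND PROOFS =====
theorem flags_foldl (vs : List (List (String × String))) (a b c : Bool) :
    vs.foldl
      (fun (st : Bool × Bool × Bool) v =>
        let hc := st.1 || ((PySem.Dict.mk v).get? "severity" == some "critical")
        let content := PySem.Str.lower ((PySem.Dict.mk v).getD "content" "")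
        let ha := st.2.1 || PySem.Str.isIn "authentication" content
        let hd := st.2.2 || PySem.Str.isIn "data" content
        (hc, ha, hd))
      (a, b, c)
    = (a || vs.any (fun v => (PySem.Dict.mk v).get? "severity" == some "critical"),
       b || vs.any (fun v => PySem.Str.isIn "authentication" (PySem.Str.lower ((PySem.Dict.mk v).getD "content" ""))),
       c || vs.any (fun v => PySem.Str.isIn "data" (PySem.Str.lower ((PySem.Dict.mk v).getD "content" "")))) := by
  induction vs generalizing a b c with
  | nil => simp
  | cons v vs ih =>
    rw [List.foldl_cons, ih]
    simp [Bool.or_assoc]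

theorem count_pos_iff_any (vs : List (List (String × String))) :
    ((vs.filter (fun v => (PySem.Dict.mk v).get? "severity" == some "critical")).length > 0)
    ↔ vs.any (fun v => (PySem.Dict.mk v).get? "severity" == some "critical") = true := by
  simp [List.length_pos_iff, List.any_eq_true, List.filter_eq_nil_iff]

-- ===== VERDICT (by name: the statement is the Claim_ definition above) =====
theorem identify_compliance_issues_py_spec : Claim_equal_identify_compliance_issues_py := by
  intro vn vs _
  unfold Spec_identify_compliance_issues_py identify_compliance_issues_py identify_compliance_issues_py_alt
  rw [flags_foldl]
  simp only [Bool.false_or]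
  by_cases h : ((vs.filter (fun v => (PySem.Dict.mk v).get? "severity" == some "critical")).length > 0)
  · rw [if_pos h, if_pos ((count_pos_iff_any vs).mp h)]
  · rw [if_neg h, if_neg (fun hb => h ((count_pos_iff_any vs).mpr hb))]
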